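-- pv_equiv track=rewrite | github.com/BartoszGondek/prg-basics | 04-Functions/7-14.py | f
-- ===== SOURCE A (Python) =====
-- def f(detector):
--     sum=0
--     for char in detector:
--         if char == "+":
--             sum+= 1
--         elif char == "-":
--             sum-= 1
--         if sum >= 3:
--            return True
--     return False
-- ===== SOURCE B (Python) =====
-- def f(detector):
--     # Max prefix sum of the +1/-1 weights, computed by the right-to-left
--     # recurrence best(c::rest) = max(0, w(c) + best(rest)); reaches-3 iff max >= 3.
--     best = 0
--     for c in reversed(detector):
--         w = 1 if c == "+" else -1 if c == "-" else 0
--         best = max(0, w + best)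
--     return best >= 3
-- ===== Notes on version B (the rewrite author's own statement) =====
-- stated objective: alternative
-- what changed: B computes the maximum prefix sum via the right-to-left Kadane-style recurrence best = max(0, weight + best) over the reversed string and compares it to 3 once at the end, instead of A's left-to-right running sum with an early-exit threshold test on each step.
import Mathlib
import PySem

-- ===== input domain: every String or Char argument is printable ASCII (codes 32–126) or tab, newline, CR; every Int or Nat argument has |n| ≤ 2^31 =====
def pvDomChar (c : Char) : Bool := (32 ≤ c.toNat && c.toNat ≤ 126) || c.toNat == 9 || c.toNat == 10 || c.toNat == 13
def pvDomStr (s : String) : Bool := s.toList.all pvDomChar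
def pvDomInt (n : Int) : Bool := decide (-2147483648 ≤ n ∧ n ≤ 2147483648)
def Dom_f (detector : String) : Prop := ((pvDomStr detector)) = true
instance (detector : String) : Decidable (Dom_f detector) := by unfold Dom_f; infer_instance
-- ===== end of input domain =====

-- B computes the maximum prefix sum by a right-to-left max(0, w + best) recurrence and compares it to 3 once,
-- instead of A's left-to-right running sum with per-step early exit (alternative decomposition; same cost).


-- ===== PORT A =====
-- A's for-loop with early return, as structural recursion on the characters with the running sum.
def fLoop (sum : Int) : List Char → Bool
  | [] => false
  | c :: rest =>
    let sum' := if c = '+' then sum + 1 else if c = '-' then sum - 1 else sum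
    if sum' ≥ 3 then true else fLoop sum' rest

def f (detector : String) : Bool := fLoop 0 detector.toList

-- ===== PORT B =====
-- weight of one character
def fWeight (c : Char) : Int := if c = '+' then 1 else if c = '-' then -1 else 0

-- B's loop over reversed(detector): best(c::rest) = max(0, w(c) + best(rest)) — i.e. structural
-- recursion consuming the string from the left but combining from the right, exactly the reversed fold.
def fBest : List Char → Int
  | [] => 0
  | c :: rest => max 0 (fWeight c + fBest rest)

def f_alt (detector : String) : Bool := decide (fBest detector.toList ≥ 3)

-- ===== PRECONDITION & SPEC =====
def Spec_f (detector : String) (out : Bool) : Prop := out = f_alt detector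
instance (detector : String) (out : Bool) : Decidable (Spec_f detector out) := by unfold Spec_f; infer_instance

-- ===== CLAIM =====
def Claim_equal_f : Prop := ∀ (detector : String), Dom_f detector → Spec_f detector (f detector)

-- ===== LEMMAS AND PROOFS =====
theorem fBest_nonneg (l : List Char) : 0 ≤ fBest l := by
  cases l with
  | nil => simp [fBest]
  | cons c rest => exact le_max_left _ _

theorem fLoop_eq_best (l : List Char) : ∀ (s : Int), s < 3 →
    fLoop s l = decide (s + fBest l ≥ 3) := by
  induction l with
  | nil => intro s hs; simp [fLoop, fBest]; omega
  | cons c rest ih =>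
    intro s hs
    have hb := fBest_nonneg rest
    simp only [fLoop, fBest, fWeight]
    by_cases h : c = '+'
    · simp only [if_pos h]
      by_cases hge : s + 1 ≥ 3
      · simp only [if_pos hge]
        have : s + max 0 (1 + fBest rest) ≥ 3 := by
          have := le_max_right (0 : Int) (1 + fBest rest); omega
        simp [this]
      · simp only [if_neg hge]
        rw [ih (s + 1) (by omega), decide_eq_decide]
        rcases max_cases 0 (1 + fBest rest) with ⟨h1, _⟩ | ⟨h1, _⟩ <;> rw [h1] <;> omega
    · by_cases h2 : c = '-'
      · simp only [if_neg h, if_pos h2]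
        by_cases hge : s - 1 ≥ 3
        · omega
        · simp only [if_neg hge]
          rw [ih (s - 1) (by omega), decide_eq_decide]
          rcases max_cases 0 (-1 + fBest rest) with ⟨h1, _⟩ | ⟨h1, _⟩ <;> rw [h1] <;> omega
      · simp only [if_neg h, if_neg h2]
        by_cases hge : s ≥ 3
        · omega
        · simp only [if_neg hge]
          rw [ih s (by omega), decide_eq_decide]
          rcases max_cases 0 (0 + fBest rest) with ⟨h1, _⟩ | ⟨h1, _⟩ <;> rw [h1] <;> omega

-- ===== VERDICT =====
theorem f_spec : Claim_equal_f := by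
  intro d _
  unfold Spec_f f f_alt
  rw [fLoop_eq_best d.toList 0 (by norm_num)]
  norm_num
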